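/- GENERATED by mk_final_copies.py from the proof of the farm's unit `start_decoder.R16c` (farm:start_decoder.R16c.1: Proof.lean) as the
   re-elaboration sweep compiled it — do not edit. -/
import Asan.CheckWalk
import Vorbis.Spec.Reader
import Vorbis.Spec.Units.start_decoder_R16c

open X86 X86.User Asan Vorbis Vorbis.Spec Vorbis.Spec.StartDecoder

set_option maxRecDepth 4000
set_option maxHeartbeats 4000000

namespace Vorbis.Spec.start_decoder_R16c

/-- **Segment R16c of `start_decoder`** (`cut321` 0x1166c4 … 0x1166f1, returns into `cut322` 0x1166f6; stb_vorbis_fixed.c 4160–4161):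
the spill of rax (= `setup_malloc(f, 2·b1)`) into `[R + 10H]`, the checked store8 `f->previous_window[i] = rax` (check site 0x1166d8:
`f + 1128 + 8·i`, `i < 16`, inside `*f`), then `setup_malloc(f, 2·longest_floorlist)` (esi = 2·dword `[R + 28H]`, `2 ≤ LF ≤ 250` by
`Mid.lfl`: no 32-bit wrap). The two forms of the slot's address the code computes (`rbp + rbx·8 + 468H`, `rbp + r15·8 + 8` with
r15 = rbx + 8CH) are given to the walker as ONE address (`hadr1`, `hadr2`). Up to the callee's entry the footprint is the pushed return
addresses, the spill and the slot: every window a `ChanWin g i` (arms 1, 2, 8), so `FInv.carry` / `Mid.carry_spill` give the point's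
memory parts there. At the return: `SecPt.alloc_call` (the request fits: the grown ghost, rax a block `Since A9 …`) or
`SecPt.alloc_fail` (NULL, the same ghost); the loop's clauses by `ChanLoop.of_secPt` with `ChanWin.fields_same` twice; the slots of
channel `i` itself (`channel_buffers[i]` untouched, `previous_window[i]` = the spilled rax by `u_read`) are in no window of the
allocator (`hslots`); the earlier `PendR16` survive the growth by `PendR16.mono`. -/
theorem segR16c_walk {Lay : Layout} (hLay : Lay.hi = 0x1000000) {μ : Microarch} (hμ : UserX.MicroOK μ) {u₀ : State}
    (hcode : HasCodeNat Lay u₀ Vorbis.L.start_decoder.entry Vorbis.Code.code_start_decoder.nat Vorbis.L.start_decoder.size)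
    (h_setup_malloc : ∀ (others : List Obj) (frames : List (Nat × FrameLayout)) (A : Arena),
      Calls Lay μ Vorbis.WayInv (Vorbis.conv u₀) Vorbis.L.setup_malloc.entry (Vorbis.Spec.setup_malloc.spec others frames A))
    (hstore8 : Asan.SmallCheck Lay μ Vorbis.WayInv (Vorbis.CodeOK u₀) [.rax, .rcx, .rdx] 8 Vorbis.L.__asan_store8_noabort.entry)
    {g : Ghost} {i : Nat} {v : State} {A9 : Arena} {A : Arena × List Obj} (hb : BodyR16b u₀ g i A9 A v) :
    ReachVia Lay μ WayInv v (fun w => AtR16c u₀ g i w) := by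
  have hl := hb.loop
  have hpt := hl.secPt
  have hfr := hpt.frame
  have hh := hpt.hand
  have hm := hpt.mid
  have hp : Pos g A := hpt.pos
  have he := hfr.entry
  v_entry he
  obtain ⟨hRa, hR8⟩ := hfr.r_eq
  simp only [steady, Ghost.RA] at hRa
  simp only [depth] at he_room he_stack
  have hflo := hp.f_lo
  have hf2 := hp.f_hi
  have hf3 := hp.f_stack
  simp only [Ghost.RA] at hf3
  have hRn : (addr g.R).toNat = g.R := toNat_addr _ (by omega)
  have hfn : (addr g.f).toNat = g.f := toNat_addr _ (by omega)
  have hlt := hb.lt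
  have hhd := hm.header.HD1
  have hile := hl.i_le
  have hi16 : i < 16 := by omega
  have w_rip := hfr.rip
  have c_rsp := hfr.rsp
  have c_rbp := hpt.rbp
  have c_r14 := hl.r14
  have c_rbx := hb.rbx
  have c_r12 := hb.r12
  have c_r13 := hb.r13
  have w_eq : Mem.EqOn Vorbis.L.textLo Vorbis.L.textHi u₀.mem v.mem := hfr.code
  have hdf : v.flags .df = false := (show abiInv _ from hfr.inv).1
  have hmx : v.mxcsr &&& 0x1F80 = 0x1F80 := (show abiInv _ from hfr.inv).2
  have hsse := Vorbis.sseOK_of_abiInv hfr.inv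
  have hsm := h_setup_malloc A.2 g.frames' A.1
  -- the two forms of `&f->previous_window[i]` the code computes, as one address
  have hadr1 : addr g.f + (addr i + 140) * 8 + 8 = addr (g.f + 1128 + 8 * i) := by
    simp only [vfield]
    exact congrArg addr (by omega)
  have hadr2 : addr g.f + addr i * 8 + 1128 = addr (g.f + 1128 + 8 * i) := by
    simp only [vfield]
    exact congrArg addr (by omega)
  have hpwn : (addr (g.f + 1128 + 8 * i)).toNat = g.f + 1128 + 8 * i := toNat_addr _ (by omega)
  -- `longest_floorlist`, as the four bytes the load at 0x1166e7 reads
  have hLF := hm.lfl (by omega) (by omega)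
  obtain ⟨lf, hlfv, hlf2, hlf250⟩ : ∃ lf : Nat, v.mem.readLE (addr g.R + 40) 4 = lf ∧ 2 ≤ lf ∧ lf ≤ 250 := by
    have h1 := hLF.lo
    have h2 := hLF.hi
    rw [Mem.i32_def] at h1 h2
    have hlt := Mem.u32_lt v.mem (g.R + 0x28)
    have hc := sint32_cases (v.mem.u32 (g.R + 0x28))
    unfold Mem.u32 at h1 h2 hlt hc
    rw [← addr_add_lit] at h1 h2 hlt hc
    exact ⟨_, rfl, by omega, by omega⟩
  u_walk hcode [hμ.vendor, hadr1, hadr2] until [Vorbis.L.start_decoder.cut322] span [Vorbis.L.textLo, Vorbis.L.textHi] side (v_side)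
  case check_1166d8 =>
    -- 0x1166d8: the store of `f->previous_window[i]` (f + 1128 + 8·i, i < 16) lies inside `*f`
    have hun : ShadowUntouched v.mem s_1166d8.mem := by v_untouched
    refine (hh.obj.mono (frames'_sub g A.2)).accSmall hfr.shadow hun _ 8 (by decide) (by u_omega) ?_
    simp only [Off.sizeof.stb_vorbis]
    u_omega
  case call_inv => v_inv
  case pre_1166f1 =>
    have hun : ShadowUntouched v.mem s_1166f1.mem := by v_untouched
    have hs : Mem.SameExcept [⟨g.R - 8, g.R⟩, ⟨g.R + 16, g.R + 24⟩, ⟨g.f + 1128 + 8 * i, g.f + 1136 + 8 * i⟩]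
        v.mem s_1166f1.mem := by u_same
    refine ⟨shadowPre_call hfr (by rw [w_rsp]; u_omega) hun, ?_, ?_, hh.arenaText⟩
    · rw [w_rdi, hfn]
      exact (hh.obj.mono (frames'_sub g A.2)).blockLive
    · rw [w_rdi, hfn]
      apply hm.arena.frame (by simp only [Off.sizeof.stb_vorbis]; omega)
      apply hs.eqOn
      intro w hw
      simp only [List.mem_cons, List.mem_nil_iff, or_false] at hw
      rcases hw with rfl | rfl | rfl
      all_goals
        simp only [voff]
        omega
  -- the returned state (0x1166f6): the facts about the call state `s_1166f1`
  have hsp : (s_1166f1.reg .rsp).toNat + 8 = g.R := by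
    rw [w_rsp_1166f1]
    u_omega
  have hrdi : (s_1166f1.reg .rdi).toNat = g.f := by
    rw [w_rdi_1166f1]
    exact hfn
  -- the request: `2 · longest_floorlist` (2 ≤ LF ≤ 250: no 32-bit wrap)
  have hn : (s_1166f1.reg .rsi).toNat % 2 ^ 32 = 2 * lf := by
    rw [w_rsi_1166f1, Vorbis.toNat_ofBV32, BitVec.toNat_setWidth, UInt64.toNat_toBitVec, UInt64.toNat_add, Vorbis.toNat_ofBV32,
      BitVec.toNat_ofNat]
    omega
  -- `Frame`'s and `Mid`'s memory parts at the call state: the spill, the store of `previous_window[i]`, two pushed return addresses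
  have hun0 : ShadowUntouched v.mem s_1166f1.mem := by v_untouched
  have hs0 : Mem.SameExcept [⟨g.R - 8, g.R⟩, ⟨g.R + 16, g.R + 24⟩, ⟨g.f + 1128 + 8 * i, g.f + 1136 + 8 * i⟩]
      v.mem s_1166f1.mem := by u_same
  have hws0 : ∀ w, w ∈ [(⟨g.R - 8, g.R⟩ : Span), ⟨g.R + 16, g.R + 24⟩, ⟨g.f + 1128 + 8 * i, g.f + 1136 + 8 * i⟩] →
      ChanWin g i A9 A w := by
    intro w hw
    simp only [List.mem_cons, List.mem_nil_iff, or_false] at hw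
    unfold ChanWin
    rcases hw with rfl | rfl | rfl
    · left
      simp only []
      omega
    · right
      left
      simp only []
      omega
    · right
      right
      right
      right
      right
      right
      right
      left
      simp only []
      omega
  have hbits0 : Bits (g.Blk A) g.len s_1166f1.mem g.f := by
    apply bits_kept hp hm.bits hs0
    intro w hw
    simp only [List.mem_cons, List.mem_nil_iff, or_false] at hw
    rcases hw with rfl | rfl | rfl
    · left
      simp only []
      omega
    · left
      simp only []
      omega
    · right
      right
      left
      simp only []
      omega
  have hf1 : FInv g A s_1166f1.mem := (FInv.of hfr).carry hp hs0 hun0 (fun w hw => (hws0 w hw).secWin)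
  have hm1 : Mid g 9 9 10 A9 A s_1166f1.mem :=
    hm.carry_spill hp hs0 hun0 (fun w hw => (hws0 w hw).midWin) hbits0 (ChanWin.consts_same hp hm.consts hs0 hws0)
  have hi16' : i ≤ 16 := by omega
  -- the callee's footprint, in the callee's terms
  have hsame := w_same
  simp only [X86.User.Spec.footprint, vspec] at hsame
  have hspn : (s_1166f1.reg .rsp).toNat = g.R - 8 := by omega
  have a1 := hm.arena.AR1
  have a2 := hm.arena.AR2
  have hcodeOK : CodeOK u₀ s_1166f1r.mem := Vorbis.conv_code_eqOn w_code
  have hrbp : s_1166f1r.reg .rbp = addr g.f := by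
    rw [w_kept.get .rbp rfl]
    exact c_rbp
  have hr14 : s_1166f1r.reg .r14 = v.reg .r14 := w_kept.get .r14 rfl
  have hrbx : s_1166f1r.reg .rbx = addr i := by
    rw [w_kept.get .rbx rfl]
    exact c_rbx
  have hr12 : s_1166f1r.reg .r12 = addr (i + 0x6c) := by
    rw [w_kept.get .r12 rfl]
    exact c_r12
  have hr13 : s_1166f1r.reg .r13 = addr (g.f + 0x368 + 8 * i) := by
    rw [w_kept.get .r13 rfl]
    exact c_r13
  obtain ⟨e1, e2, e3, e4, e5, e6, e7⟩ := ChanWin.fields_same hp hi16' hs0 (fun x hx => Or.inl (hws0 x hx))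
  -- the slots of channel `i` at the call state: `channel_buffers[i]` untouched, `previous_window[i]` = the spilled rax
  have ecb : stb_vorbis.channel_buffers s_1166f1.mem g.f i = stb_vorbis.channel_buffers v.mem g.f i := by
    simp only [vacc, voff]
    have E : Mem.EqOn (g.f + 872 + 8 * i) (g.f + 880 + 8 * i) v.mem s_1166f1.mem := by
      apply hs0.eqOn
      intro w hw
      simp only [List.mem_cons, List.mem_nil_iff, or_false] at hw
      rcases hw with rfl | rfl | rfl
      all_goals
        simp only []
        omega
    exact E.ptr _ (by omega) (by omega) (by omega)
  have epw : stb_vorbis.previous_window s_1166f1.mem g.f i = (v.reg .rax).toNat := by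
    simp only [vacc, voff]
    unfold Mem.u64
    rw [w_mem_1166f1]
    u_read
  -- the two slots of channel `i` are in no window of the allocator
  have hslots : ∀ {ws : List Span}, Mem.SameExcept ws s_1166f1.mem s_1166f1r.mem → (∀ x, x ∈ ws → AllocWin g A x) →
      stb_vorbis.channel_buffers s_1166f1r.mem g.f i = stb_vorbis.channel_buffers s_1166f1.mem g.f i ∧
      stb_vorbis.previous_window s_1166f1r.mem g.f i = stb_vorbis.previous_window s_1166f1.mem g.f i := by
    intro ws hs hok
    obtain ⟨p1, p2, p3, p4, p5, p6, p7, p8, p9, p10, p11, p12, p13, p14⟩ := hp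
    have E : Mem.EqOn (g.f + 136) (g.f + 1808) s_1166f1.mem s_1166f1r.mem := by
      apply hs.eqOn
      intro x hx
      have q := hok x hx
      unfold AllocWin at q
      omega
    constructor
    · simp only [vacc, voff]
      exact E.ptr _ (by omega) (by omega) (by omega)
    · simp only [vacc, voff]
      exact E.ptr _ (by omega) (by omega) (by omega)
  -- `longest_floorlist` as `BodyR16c.p3` reads it, at any memory where the slot reads as at `v`
  have hlfn : (v.mem.i32 (g.R + 0x28)).toNat = lf := by
    have h1 := hLF.lo
    rw [Mem.i32_def] at h1 ⊢
    have hlt := Mem.u32_lt v.mem (g.R + 0x28)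
    have hc := sint32_cases (v.mem.u32 (g.R + 0x28))
    unfold Mem.u32 at h1 hlt hc ⊢
    rw [← addr_add_lit] at h1 hlt hc ⊢
    rw [hlfv] at h1 hlt hc ⊢
    omega
  by_cases hfit : A.1.Fits ((s_1166f1.reg .rsi).toNat % 2 ^ 32)
  · -- the block was allocated: the ghost grows, `Since A.1 …`, hence `Since A9 …`
    obtain ⟨hpt', hrax, _, hsince⟩ :=
      SecPt.alloc_call hfr hh hp hf1 hm1 hsp hrdi hsame w_post hfit w_rip w_rsp hcodeOK w_inv hrbp
    have hwin := allocWins_ok hp hsp hrdi (shadow_win_of_fits hm1.arena hfit)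
    obtain ⟨d1, d2, d3, d4, d5, d6, d7⟩ :=
      ChanWin.fields_same (i := i) (A9 := A9) hp hi16' hsame (fun x hx => Or.inr (hwin x hx))
    obtain ⟨dcb, dpw⟩ := hslots hsame hwin
    rw [hn] at hpt' hsince
    have hext := A.1.extends_pushSetup (2 * lf)
    have hloop := hl.of_secPt hpt' hext hr14 (d1.trans e1) (d2.trans e2) (d3.trans e3) (d4.trans e4)
      (fun j hj => (d5 j hj).trans (e5 j hj)) (fun j hj => (d6 j hj).trans (e6 j hj))
      (fun j hj => (d7 j hj).trans (e7 j hj))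
    have hbs' : bsize s_1166f1r.mem g.f 1 = bsize v.mem g.f 1 := by
      rw [bsize_one, bsize_one, d2.trans e2]
    have hraxn : (s_1166f1r.reg .rax).toNat = A.1.B + (A.1.S + 32) := by omega
    refine ReachVia.done ⟨A9, _, hloop, ?_, hrbx, hr12, hr13, ?_, ?_, Or.inr ?_⟩
    · rw [d1.trans e1]
      exact hlt
    · rw [dcb.trans ecb, hbs']
      exact hb.cb.mono hext
    · rw [dpw.trans epw, hbs']
      exact hb.p2.mono hext
    · rw [hraxn, d4.trans e4, hlfn]
      exact hsince.older hm.extc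
  · -- the request did not fit: NULL, the same ghost
    obtain ⟨hrax, ha', hun, hfail⟩ := w_post.2 hfit
    obtain ⟨hpt', _⟩ := SecPt.alloc_fail hfr hh hp hf1 hm1 hsp hrdi ha' hun hfail w_rip w_rsp hcodeOK w_inv hrbp
    have hwin : ∀ x, x ∈ [(⟨(s_1166f1.reg .rsp).toNat - 80, (s_1166f1.reg .rsp).toNat⟩ : Span),
        ⟨(s_1166f1.reg .rdi).toNat + 8, (s_1166f1.reg .rdi).toNat + 12⟩] → AllocWin g A x := by
      intro x hx
      simp only [List.mem_cons, List.mem_nil_iff, or_false] at hx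
      unfold AllocWin
      rcases hx with rfl | rfl
      · left
        simp only []
        omega
      · right
        left
        simp only []
        omega
    obtain ⟨d1, d2, d3, d4, d5, d6, d7⟩ :=
      ChanWin.fields_same (i := i) (A9 := A9) hp hi16' hfail (fun x hx => Or.inr (hwin x hx))
    obtain ⟨dcb, dpw⟩ := hslots hfail hwin
    have hloop := hl.of_secPt hpt' (Arena.Extends.refl _) hr14 (d1.trans e1) (d2.trans e2) (d3.trans e3) (d4.trans e4)
      (fun j hj => (d5 j hj).trans (e5 j hj)) (fun j hj => (d6 j hj).trans (e6 j hj))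
      (fun j hj => (d7 j hj).trans (e7 j hj))
    have hbs' : bsize s_1166f1r.mem g.f 1 = bsize v.mem g.f 1 := by
      rw [bsize_one, bsize_one, d2.trans e2]
    refine ReachVia.done ⟨A9, A, hloop, ?_, hrbx, hr12, hr13, ?_, ?_, Or.inl ?_⟩
    · rw [d1.trans e1]
      exact hlt
    · rw [dcb.trans ecb, hbs']
      exact hb.cb
    · rw [dpw.trans epw, hbs']
      exact hb.p2
    · rw [hrax]
      rfl

end Vorbis.Spec.start_decoder_R16c

/-- The unit `start_decoder.R16c`: `segR16c_walk` at every entry state. -/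
theorem Vorbis.Spec.Worked.start_decoder_R16c_ok : Vorbis.Spec.start_decoder_R16c.Statement := by
  intro Lay hLay μ hμ u₀ hcode h_setup_malloc hstore8 g i v hat
  obtain ⟨A9, A, hb⟩ := hat
  exact Vorbis.Spec.start_decoder_R16c.segR16c_walk hLay hμ hcode h_setup_malloc hstore8 hb
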